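-- pv_equiv track=rewrite | github.com/sammy0329/DataStructures_Study | sammy/230126_study/프로_77485_행렬 테두리 회전하기.py | solution
-- ===== SOURCE A (Python) =====
-- def solution(rows, columns, queries):
--     answer = []
--
--     # 행렬 만들기
--     graph =  [[0 for _ in range(columns)] for _ in range(rows)]
--     n = 1
--     for row in range(rows):
--         for column in range(columns):
--             graph[row][column] = n
--             n += 1
--
--     # 왼쪽 세로 -> 아래쪽 가로 -> 오른쪽 세로 -> 위쪽 가로 순으로 처리
--     for x1, y1, x2, y2 in queries:
--         tmp=graph[x1-1][y1-1] # 첫값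
--         mindata=tmp # 가장 작은 값
--
--         for i in range(x1-1,x2-1): # 왼쪽 세로
--             data = graph[i+1][y1-1]
--             graph[i][y1-1] = data
--             mindata = min(mindata, data)
--
--         for i in range(y1-1,y2-1): # 아래쪽 가로
--             data = graph[x2-1][i+1]
--             graph[x2-1][i] = data
--             mindata = min(mindata, data)
--
--         for i in range(x2-1,x1-1,-1): # 오른쪽 세로
--             data = graph[i-1][y2-1]
--             graph[i][y2-1] = data
--             mindata = min(mindata, data)
--
--         for i in range(y2-1,y1-1,-1): # 위쪽 가로
--             data = graph[x1-1][i-1]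
--             graph[x1-1][i] = data
--             mindata = min(mindata, data)
--
--         # 모든 처리 후 tmp에 저장한 값을 첫 번째 값 옆에 저장
--         graph[x1-1][y1] = tmp
--         answer.append(mindata)
--
--     return answer
-- ===== SOURCE B (Python) =====
-- def solution(rows, columns, queries):
--     # Gather the border cells in clockwise order, take their minimum, and write
--     # back the values rotated by one step, instead of four in-place shift loops.
--     graph = [[r * columns + c + 1 for c in range(columns)] for r in range(rows)]
--     answer = []
--     for x1, y1, x2, y2 in queries:
--         r1, c1, r2, c2 = x1 - 1, y1 - 1, x2 - 1, y2 - 1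
--         coords = ([(r1, c) for c in range(c1, c2)]
--                   + [(r, c2) for r in range(r1, r2)]
--                   + [(r2, c) for c in range(c2, c1, -1)]
--                   + [(r, c1) for r in range(r2, r1, -1)])
--         vals = [graph[r][c] for r, c in coords]
--         answer.append(min(vals))
--         for (r, c), v in zip(coords, vals[-1:] + vals[:-1]):
--             graph[r][c] = v
--     return answer
-- ===== Notes on version B (the rewrite author's own statement) =====
-- stated objective: alternative
-- what changed: B replaces A's four in-place neighbour-shift loops (plus the final corner patch-up write) by one gather-then-rotate pass: it lists the border coordinates once in clockwise order, takes min of the gathered values, and writes the values back rotated by one; the matrix is built by a direct r*columns+c+1 comprehension instead of A's running counter.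
-- outside the precondition, e.g. on solution(2, 2, [(1, 1, 1, 1)]): A returns [1], B raises ValueError; on solution(3, 5, [(-2, 3, 0, 0)]): A returns [3], B returns [5]; on solution(5, 5, [(1, 1, 4, -1)]): A returns [1], B returns [4]
import Mathlib
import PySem

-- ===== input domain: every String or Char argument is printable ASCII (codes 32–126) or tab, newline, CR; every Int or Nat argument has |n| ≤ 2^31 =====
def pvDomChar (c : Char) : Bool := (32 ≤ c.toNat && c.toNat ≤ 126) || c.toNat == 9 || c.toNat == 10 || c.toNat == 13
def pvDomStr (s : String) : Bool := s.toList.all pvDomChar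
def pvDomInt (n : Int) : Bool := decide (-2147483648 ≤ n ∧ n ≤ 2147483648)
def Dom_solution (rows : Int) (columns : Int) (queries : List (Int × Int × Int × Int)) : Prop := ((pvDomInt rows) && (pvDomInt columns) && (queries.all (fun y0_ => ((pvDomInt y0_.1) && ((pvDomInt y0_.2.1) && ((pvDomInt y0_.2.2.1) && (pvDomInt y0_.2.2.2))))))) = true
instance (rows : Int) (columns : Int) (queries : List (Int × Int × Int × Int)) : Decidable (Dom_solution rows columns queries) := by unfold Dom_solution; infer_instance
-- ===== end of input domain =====

-- B rewrites A's four in-place border-shift loops as one gather/rotate pass over the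
-- clockwise border coordinate list (objective: alternative decomposition, same cost).
-- Both Pythons mutate only a local matrix; the equivalence is about the return value.

-- ===== PORT A =====
-- graph[i][j] (reads) and graph[i][j] = v (writes): exact where the index pair is in
-- range (guaranteed by Pre_); outside Pre_ nothing is claimed.
def pyGet2 (g : List (List Int)) (i j : Int) : Int :=
  PySem.List.pyGetD (PySem.List.pyGetD g i []) j 0

def pySet2 (g : List (List Int)) (i j : Int) (v : Int) : List (List Int) :=
  PySem.List.pySetD g i (PySem.List.pySetD (PySem.List.pyGetD g i []) j v)

-- the body of A's per-query loop, literally: four shift loops, then graph[x1-1][y1] = tmp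
def stepA (st : List (List Int) × List Int) (q : Int × Int × Int × Int) : List (List Int) × List Int :=
  let x1 := q.1; let y1 := q.2.1; let x2 := q.2.2.1; let y2 := q.2.2.2
  let g := st.1
  let tmp := pyGet2 g (x1-1) (y1-1)
  let s1 := (PySem.List.pyRange (x1-1) (x2-1) 1).foldl
    (fun (p : List (List Int) × Int) i =>
      let data := pyGet2 p.1 (i+1) (y1-1)
      (pySet2 p.1 i (y1-1) data, min p.2 data)) (g, tmp)
  let s2 := (PySem.List.pyRange (y1-1) (y2-1) 1).foldl
    (fun (p : List (List Int) × Int) i =>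
      let data := pyGet2 p.1 (x2-1) (i+1)
      (pySet2 p.1 (x2-1) i data, min p.2 data)) s1
  let s3 := (PySem.List.pyRange (x2-1) (x1-1) (-1)).foldl
    (fun (p : List (List Int) × Int) i =>
      let data := pyGet2 p.1 (i-1) (y2-1)
      (pySet2 p.1 i (y2-1) data, min p.2 data)) s2
  let s4 := (PySem.List.pyRange (y2-1) (y1-1) (-1)).foldl
    (fun (p : List (List Int) × Int) i =>
      let data := pyGet2 p.1 (x1-1) (i-1)
      (pySet2 p.1 (x1-1) i data, min p.2 data)) s3
  (pySet2 s4.1 (x1-1) y1 tmp, st.2 ++ [s4.2])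

def solution (rows : Int) (columns : Int) (queries : List (Int × Int × Int × Int)) : List Int :=
  (queries.foldl stepA
    (((PySem.List.pyRange 0 rows 1).foldl
        (fun (st : List (List Int) × Int) row =>
          (PySem.List.pyRange 0 columns 1).foldl
            (fun (st : List (List Int) × Int) column => (pySet2 st.1 row column st.2, st.2 + 1)) st)
        ((PySem.List.pyRange 0 rows 1).map (fun _ => (PySem.List.pyRange 0 columns 1).map (fun _ => (0 : Int))), 1)).1,
     [])).2

-- ===== PORT B =====
-- the body of B's per-query loop: clockwise border coordinates, gather, min, rotate, scatter
def stepB (st : List (List Int) × List Int) (q : Int × Int × Int × Int) : List (List Int) × List Int :=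
  let r1 := q.1 - 1; let c1 := q.2.1 - 1; let r2 := q.2.2.1 - 1; let c2 := q.2.2.2 - 1
  let coords : List (Int × Int) :=
    (PySem.List.pyRange c1 c2 1).map (fun c => (r1, c))
    ++ (PySem.List.pyRange r1 r2 1).map (fun r => (r, c2))
    ++ (PySem.List.pyRange c2 c1 (-1)).map (fun c => (r2, c))
    ++ (PySem.List.pyRange r2 r1 (-1)).map (fun r => (r, c1))
  let vals := coords.map (fun p => pyGet2 st.1 p.1 p.2)
  -- min(vals): raises on an empty border, which Pre_ excludes
  let m := (PySem.List.min? vals (fun v => v)).getD 0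
  let rotated := PySem.List.slice vals (some (-1)) none ++ PySem.List.slice vals none (some (-1))
  let g' := (coords.zip rotated).foldl (fun g pv => pySet2 g pv.1.1 pv.1.2 pv.2) st.1
  (g', st.2 ++ [m])

def solution_alt (rows : Int) (columns : Int) (queries : List (Int × Int × Int × Int)) : List Int :=
  (queries.foldl stepB
    ((PySem.List.pyRange 0 rows 1).map (fun r => (PySem.List.pyRange 0 columns 1).map (fun c => r * columns + c + 1)),
     [])).2

-- ===== PRECONDITION & SPEC =====
-- Pre_ is the problem's guaranteed query shape (1 ≤ x1 < x2 ≤ rows, 1 ≤ y1 < y2 ≤ columns).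
-- Outside it A raises IndexError, or returns a value only through Python's accidental
-- negative-index wraparound or through its interfering shift loops on degenerate
-- (x1 = x2 or y1 = y2) queries, where B's min over an empty border raises ValueError.
def Pre_solution (rows : Int) (columns : Int) (queries : List (Int × Int × Int × Int)) : Prop :=
  ∀ q ∈ queries, 1 ≤ q.1 ∧ q.1 < q.2.2.1 ∧ q.2.2.1 ≤ rows ∧ 1 ≤ q.2.1 ∧ q.2.1 < q.2.2.2 ∧ q.2.2.2 ≤ columns

instance (rows : Int) (columns : Int) (queries : List (Int × Int × Int × Int)) : Decidable (Pre_solution rows columns queries) := by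
  unfold Pre_solution; infer_instance

def pvWitness_solution : Int × Int × (List (Int × Int × Int × Int)) := (3, 3, [(1, 1, 3, 3)])

def Spec_solution (rows : Int) (columns : Int) (queries : List (Int × Int × Int × Int)) (out : List Int) : Prop := out = solution_alt rows columns queries
instance (rows : Int) (columns : Int) (queries : List (Int × Int × Int × Int)) (out : List Int) : Decidable (Spec_solution rows columns queries out) := by unfold Spec_solution; infer_instance

-- ===== CLAIM (what is proved, stated in full; the proofs are below) =====
def Claim_equal_solution : Prop := ∀ (rows : Int) (columns : Int) (queries : List (Int × Int × Int × Int)), Dom_solution rows columns queries → Pre_solution rows columns queries → Spec_solution rows columns queries (solution rows columns queries)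

-- ===== LEMMAS AND PROOFS =====

-- in-range position, matrix shape
def InR (R C : Int) (p : Int × Int) : Prop := 0 ≤ p.1 ∧ p.1 < R ∧ 0 ≤ p.2 ∧ p.2 < C
def Shp (R C : Int) (g : List (List Int)) : Prop :=
  g.length = R.toNat ∧ ∀ row ∈ g, row.length = C.toNat

-- a sequence of writes, and last-match lookup in it
def wApp (g : List (List Int)) (W : List ((Int × Int) × Int)) : List (List Int) :=
  W.foldl (fun g pv => pySet2 g pv.1.1 pv.1.2 pv.2) g

def lk : List ((Int × Int) × Int) → (Int × Int) → Option Int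
  | [], _ => none
  | pv :: W, p => (lk W p).orElse (fun _ => if pv.1 = p then some pv.2 else none)

theorem lk_append (W1 W2 : List ((Int × Int) × Int)) (p : Int × Int) :
    lk (W1 ++ W2) p = (lk W2 p).orElse (fun _ => lk W1 p) := by
  induction W1 with
  | nil => cases h : lk W2 p <;> simp [lk, h]
  | cons pv W1 ih =>
      simp only [List.cons_append, lk, ih]
      cases h : lk W2 p <;> simp

theorem lk_eq_none {W : List ((Int × Int) × Int)} {p : Int × Int}
    (h : ∀ pv ∈ W, pv.1 ≠ p) : lk W p = none := by
  induction W with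
  | nil => rfl
  | cons pv W ih =>
      simp only [lk, ih (fun x hx => h x (List.mem_cons_of_mem _ hx))]
      simp [h pv (List.mem_cons_self ..)]

theorem lk_map_eq_none {dst : Int → Int × Int} {v : Int → Int} {l : List Int} {p : Int × Int}
    (h : ∀ i ∈ l, dst i ≠ p) : lk (l.map (fun i => (dst i, v i))) p = none := by
  apply lk_eq_none
  intro pv hpv
  obtain ⟨i, hi, rfl⟩ := List.mem_map.1 hpv
  exact h i hi

theorem lk_map_eq_some {dst : Int → Int × Int} {v : Int → Int} {l : List Int} {p : Int × Int}
    {i0 : Int} (hi : i0 ∈ l) (hp : dst i0 = p) (huniq : ∀ j ∈ l, dst j = p → j = i0) :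
    lk (l.map (fun i => (dst i, v i))) p = some (v i0) := by
  induction l with
  | nil => cases hi
  | cons a l ih =>
      by_cases hmem : i0 ∈ l
      · simp only [List.map_cons, lk,
          ih hmem (fun j hj hdj => huniq j (List.mem_cons_of_mem _ hj) hdj)]
        rfl
      · have ha : a = i0 := by
          rcases List.mem_cons.1 hi with h | h
          · exact h.symm
          · exact absurd h hmem
        subst ha
        have hnone : lk (l.map (fun i => (dst i, v i))) p = none := by
          apply lk_map_eq_none
          intro j hj hdj
          exact hmem (huniq j (List.mem_cons_of_mem _ hj) hdj ▸ hj)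
        simp [lk, hnone, hp]

theorem wApp_cons (g : List (List Int)) (pv : (Int × Int) × Int) (W : List ((Int × Int) × Int)) :
    wApp g (pv :: W) = wApp (pySet2 g pv.1.1 pv.1.2 pv.2) W := rfl

theorem wApp_append (g : List (List Int)) (W1 W2 : List ((Int × Int) × Int)) :
    wApp g (W1 ++ W2) = wApp (wApp g W1) W2 := List.foldl_append ..

-- basic get/set facts
theorem get2_eq (R C : Int) {g : List (List Int)} (hS : Shp R C g) {i j : Int}
    (hp : InR R C (i, j)) : pyGet2 g i j = (g.getD i.toNat []).getD j.toNat 0 := by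
  obtain ⟨hl, hrow⟩ := hS
  simp only [InR] at hp
  obtain ⟨hi0, hiR, hj0, hjC⟩ := hp
  have hiL : i < (g.length : Int) := by omega
  have hiN : i.toNat < g.length := by omega
  unfold pyGet2
  rw [PySem.List.pyGetD_eq_getElem g [] hi0 hiL]
  have hrl : g[i.toNat].length = C.toNat := hrow _ (List.getElem_mem hiN)
  have hjL : j < (g[i.toNat].length : Int) := by omega
  have hjN : j.toNat < g[i.toNat].length := by omega
  rw [PySem.List.pyGetD_eq_getElem _ 0 hj0 hjL]
  rw [List.getD_eq_getElem g [] hiN, List.getD_eq_getElem _ 0 hjN]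

theorem set2_eq (R C : Int) {g : List (List Int)} (hS : Shp R C g) {i j : Int} (v : Int)
    (hp : InR R C (i, j)) : pySet2 g i j v = g.set i.toNat ((g.getD i.toNat []).set j.toNat v) := by
  obtain ⟨hl, hrow⟩ := hS
  simp only [InR] at hp
  obtain ⟨hi0, hiR, hj0, hjC⟩ := hp
  have hiN : i.toNat < g.length := by omega
  have hiL : i < (g.length : Int) := by omega
  unfold pySet2
  rw [PySem.List.pySetD_of_nonneg _ _ hi0, PySem.List.pySetD_of_nonneg _ _ hj0,
    PySem.List.pyGetD_eq_getElem g [] hi0 hiL, List.getD_eq_getElem g [] hiN]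

theorem shp_set2 (R C : Int) {g : List (List Int)} (hS : Shp R C g) {i j : Int} (v : Int)
    (hp : InR R C (i, j)) : Shp R C (pySet2 g i j v) := by
  rw [set2_eq R C hS v hp]
  obtain ⟨hl, hrow⟩ := hS
  refine ⟨by simpa using hl, ?_⟩
  intro row hmem
  rcases List.mem_or_eq_of_mem_set hmem with h | h
  · exact hrow _ h
  · subst h
    simp only [List.length_set]
    simp only [InR] at hp
    obtain ⟨hi0, hiR, _, _⟩ := hp
    have hiN : i.toNat < g.length := by omega
    rw [List.getD_eq_getElem g [] hiN]
    exact hrow _ (List.getElem_mem hiN)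

theorem get2_set2 (R C : Int) {g : List (List Int)} (hS : Shp R C g) {a b i j : Int} (v : Int)
    (hq : InR R C (a, b)) (hp : InR R C (i, j)) :
    pyGet2 (pySet2 g a b v) i j = if a = i ∧ b = j then v else pyGet2 g i j := by
  have hS' := shp_set2 R C hS v hq
  rw [get2_eq R C hS' hp, get2_eq R C hS hp, set2_eq R C hS v hq]
  obtain ⟨hl, hrow⟩ := hS
  simp only [InR] at hp hq
  obtain ⟨hi0, hiR, hj0, hjC⟩ := hp
  obtain ⟨ha0, haR, hb0, hbC⟩ := hq
  have hiN : i.toNat < g.length := by omega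
  have haN : a.toNat < g.length := by omega
  have hrli : g[i.toNat].length = C.toNat := hrow _ (List.getElem_mem hiN)
  have hrla : g[a.toNat].length = C.toNat := hrow _ (List.getElem_mem haN)
  have hjN : j.toNat < g[i.toNat].length := by omega
  rw [List.getD_eq_getElem _ [] (show i.toNat < (g.set a.toNat ((g.getD a.toNat []).set b.toNat v)).length by
        simpa using hiN),
      List.getElem_set]
  by_cases hai : a = i
  · subst hai
    rw [if_pos rfl, List.getD_eq_getElem g [] haN]
    have hjN' : j.toNat < (g[a.toNat].set b.toNat v).length := by
      simpa [List.length_set] using (by omega : j.toNat < g[a.toNat].length)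
    rw [List.getD_eq_getElem _ 0 hjN', List.getElem_set]
    by_cases hbj : b = j
    · subst hbj
      rw [if_pos rfl, if_pos ⟨rfl, rfl⟩]
    · have hne : b.toNat ≠ j.toNat := by omega
      rw [if_neg hne, if_neg (by simp [hbj] : ¬(a = a ∧ b = j)),
        List.getD_eq_getElem _ 0 (by omega : j.toNat < g[a.toNat].length)]
  · have hne : a.toNat ≠ i.toNat := by omega
    rw [if_neg hne, if_neg (by simp [hai] : ¬(a = i ∧ b = j)),
      List.getD_eq_getElem g [] hiN, List.getD_eq_getElem _ 0 hjN]

theorem shp_wApp (R C : Int) {g : List (List Int)} {W : List ((Int × Int) × Int)}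
    (hS : Shp R C g) (hW : ∀ pv ∈ W, InR R C pv.1) : Shp R C (wApp g W) := by
  induction W generalizing g with
  | nil => simpa [wApp] using hS
  | cons pv W ih =>
      exact ih (shp_set2 R C hS pv.2 (hW pv (List.mem_cons_self ..)))
        (fun x hx => hW x (List.mem_cons_of_mem _ hx))

theorem get2_wApp (R C : Int) {g : List (List Int)} {W : List ((Int × Int) × Int)}
    (hS : Shp R C g) (hW : ∀ pv ∈ W, InR R C pv.1) {p : Int × Int} (hp : InR R C p) :
    pyGet2 (wApp g W) p.1 p.2 = (lk W p).getD (pyGet2 g p.1 p.2) := by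
  induction W generalizing g with
  | nil => simp [wApp, lk]
  | cons pv W ih =>
      have hq := hW pv (List.mem_cons_self ..)
      have step : wApp g (pv :: W) = wApp (pySet2 g pv.1.1 pv.1.2 pv.2) W := rfl
      rw [step, ih (shp_set2 R C hS pv.2 hq) (fun x hx => hW x (List.mem_cons_of_mem _ hx)),
        get2_set2 R C hS pv.2 hq hp]
      simp only [lk]
      cases h : lk W p with
      | some v => simp
      | none =>
          have : (pv.1 = p) ↔ (pv.1.1 = p.1 ∧ pv.1.2 = p.2) := Prod.ext_iff
          by_cases hc : pv.1 = p
          · simp [if_pos hc, if_pos (this.1 hc)]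
          · simp [if_neg hc, if_neg (fun hx => hc (this.2 hx))]

theorem ext2 (R C : Int) {g g' : List (List Int)} (hS : Shp R C g) (hS' : Shp R C g')
    (h : ∀ p : Int × Int, InR R C p → pyGet2 g p.1 p.2 = pyGet2 g' p.1 p.2) : g = g' := by
  obtain ⟨hl, hrow⟩ := hS
  obtain ⟨hl', hrow'⟩ := hS'
  apply List.ext_getElem (by omega)
  intro n h1 h2
  have hrl : g[n].length = C.toNat := hrow _ (List.getElem_mem h1)
  have hrl' : g'[n].length = C.toNat := hrow' _ (List.getElem_mem h2)
  apply List.ext_getElem (by omega)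
  intro m hm1 hm2
  have hInR : InR R C ((n : Int), (m : Int)) := by
    refine ⟨by simp, ?_, by simp, ?_⟩ <;> simp <;> omega
  have hh := h _ hInR
  rw [get2_eq R C ⟨hl, hrow⟩ hInR, get2_eq R C ⟨hl', hrow'⟩ hInR] at hh
  simp only [Int.toNat_natCast] at hh
  rwa [List.getD_eq_getElem g [] h1, List.getD_eq_getElem g' [] h2,
    List.getD_eq_getElem _ 0 (by omega : m < g[n].length),
    List.getD_eq_getElem _ 0 (by omega : m < g'[n].length)] at hh

-- A's shift loops, generically: reads never hit a cell the same loop already wrote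
theorem loop_spec (R C : Int) (src dst : Int → Int × Int) (g : List (List Int))
    (hS : Shp R C g) :
    ∀ (l : List Int) (W : List ((Int × Int) × Int)) (m : Int),
      (∀ pv ∈ W, InR R C pv.1) →
      (∀ i ∈ l, InR R C (src i) ∧ InR R C (dst i)) →
      l.Pairwise (fun i j => dst i ≠ src j) →
      l.foldl (fun (p : List (List Int) × Int) i =>
          let data := pyGet2 p.1 (src i).1 (src i).2
          (pySet2 p.1 (dst i).1 (dst i).2 data, min p.2 data)) (wApp g W, m)
      = (wApp g (W ++ l.map (fun i => (dst i, (lk W (src i)).getD (pyGet2 g (src i).1 (src i).2)))),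
         l.foldl (fun m i => min m ((lk W (src i)).getD (pyGet2 g (src i).1 (src i).2))) m) := by
  intro l
  induction l with
  | nil => intro W m _ _ _; simp
  | cons i l ih =>
      intro W m hW hl hpw
      have hsrc : InR R C (src i) := (hl i (List.mem_cons_self ..)).1
      have hdst : InR R C (dst i) := (hl i (List.mem_cons_self ..)).2
      have hdata : pyGet2 (wApp g W) (src i).1 (src i).2
          = (lk W (src i)).getD (pyGet2 g (src i).1 (src i).2) := get2_wApp R C hS hW hsrc
      set v : Int := (lk W (src i)).getD (pyGet2 g (src i).1 (src i).2) with hv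
      have hstep : pySet2 (wApp g W) (dst i).1 (dst i).2 v = wApp g (W ++ [(dst i, v)]) := by
        rw [wApp_append]; rfl
      rw [List.foldl_cons]
      simp only [hdata, hstep]
      have hW' : ∀ pv ∈ W ++ [(dst i, v)], InR R C pv.1 := by
        intro pv hpv
        rcases List.mem_append.1 hpv with h | h
        · exact hW pv h
        · rcases List.mem_singleton.1 h with rfl; exact hdst
      have hlk' : ∀ j ∈ l, lk (W ++ [(dst i, v)]) (src j) = lk W (src j) := by
        intro j hj
        rw [lk_append]
        have : lk [(dst i, v)] (src j) = none := by
          simp only [lk]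
          rw [if_neg ((List.pairwise_cons.1 hpw).1 j hj)]
          rfl
        rw [this]
        cases lk W (src j) <;> rfl
      rw [ih (W ++ [(dst i, v)]) (min m v) hW'
        (fun j hj => hl j (List.mem_cons_of_mem _ hj)) (List.pairwise_cons.1 hpw).2]
      refine Prod.ext ?_ ?_
      · simp only
        rw [List.map_congr_left (fun j hj => by rw [hlk' j hj])]
        simp only [wApp_append, List.map_cons]
        rw [hv]
        rfl
      · simp only
        rw [PySem.List.foldl_congr_mem l _ _ (min m v)
          (fun acc j hj => by rw [hlk' j hj]), hv, List.foldl_cons]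

-- adjacent-pair writes: zip(tail, dropLast) as a structural recursion
def adjZip (f : Int × Int → Int) : List (Int × Int) → List ((Int × Int) × Int)
  | [] => []
  | [_] => []
  | x :: y :: t => (y, f x) :: adjZip f (y :: t)

theorem zip_tail_dropLast (f : Int × Int → Int) :
    ∀ L : List (Int × Int), L.tail.zip ((L.dropLast).map f) = adjZip f L := by
  intro L
  induction L with
  | nil => rfl
  | cons x L ih =>
      cases L with
      | nil => rfl
      | cons y t =>
          simp only [adjZip, List.tail_cons, List.dropLast_cons₂, List.map_cons, List.zip_cons_cons]
          rw [← ih]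
          rfl

theorem adjZip_keys (f : Int × Int → Int) :
    ∀ L : List (Int × Int), ∀ pv ∈ adjZip f L, pv.1 ∈ L.tail := by
  intro L
  induction L with
  | nil => intro pv h; cases h
  | cons x L ih =>
      cases L with
      | nil => intro pv h; cases h
      | cons y t =>
          intro pv h
          rcases List.mem_cons.1 h with rfl | h
          · exact List.mem_cons_self ..
          · exact List.mem_cons_of_mem _ (ih pv h)

theorem lk_adjZip_split (f : Int × Int → Int) :
    ∀ (P : List (Int × Int)) (a b : Int × Int) (Q : List (Int × Int)),
      (P ++ a :: b :: Q).Nodup →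
      lk (adjZip f (P ++ a :: b :: Q)) b = some (f a) := by
  intro P
  induction P with
  | nil =>
      intro a b Q hnd
      simp only [List.nil_append, adjZip]
      have hbQ : b ∉ Q := (List.nodup_cons.1 (List.Nodup.of_cons hnd)).1
      have : lk (adjZip f (b :: Q)) b = none :=
        lk_eq_none (fun pv hpv hq => by
          have := adjZip_keys f (b :: Q) pv hpv
          rw [List.tail_cons] at this
          exact hbQ (hq ▸ this))
      simp only [lk, this]
      simp
  | cons x P ih =>
      intro a b Q hnd
      have hrest : P ++ a :: b :: Q ≠ [] := by simp
      obtain ⟨z, t, hzt⟩ := List.exists_cons_of_ne_nil hrest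
      have hnd' : (P ++ a :: b :: Q).Nodup := by
        rw [List.cons_append] at hnd
        exact List.Nodup.of_cons hnd
      have hIH : lk (adjZip f (z :: t)) b = some (f a) := by
        rw [← hzt]
        exact ih a b Q hnd'
      rw [List.cons_append, hzt]
      show lk ((z, f x) :: adjZip f (z :: t)) b = some (f a)
      simp only [lk, hIH]
      rfl

-- A's row-initialisation loop as a write sequence
theorem inner_spec (row : Int) :
    ∀ (k : Nat) (a b : Int), (b - a).toNat = k →
      ∀ (g : List (List Int)) (n : Int),
      (PySem.List.pyRange a b 1).foldl
        (fun (st : List (List Int) × Int) column => (pySet2 st.1 row column st.2, st.2 + 1)) (g, n)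
      = (wApp g ((PySem.List.pyRange a b 1).map (fun c => ((row, c), n + (c - a)))),
         n + (((b - a).toNat : Nat) : Int)) := by
  intro k
  induction k with
  | zero =>
      intro a b hk g n
      rw [PySem.List.pyRange_one_eq_nil (by omega)]
      simp [wApp, hk]
  | succ k ih =>
      intro a b hk g n
      have hab : a < b := by omega
      rw [PySem.List.pyRange_one_cons hab, List.map_cons, List.foldl_cons, wApp_cons]
      have h1 := ih (a+1) b (by omega) (pySet2 g row a n) (n+1)
      have hfun : (fun c : Int => ((row, c), (n+1) + (c - (a+1)))) = (fun c : Int => ((row, c), n + (c - a))) := by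
        funext c
        simp only [Prod.mk.injEq, true_and]
        ring
      rw [hfun] at h1
      rw [show (((row, a), n + (a - a)).1.1 : Int) = row from rfl]
      simp only [sub_self, add_zero]
      rw [h1]
      refine Prod.ext rfl ?_
      simp only
      omega

-- A's nested build loop yields the value r*C+c+1 at each in-range cell
theorem outer_spec (R C : Int) :
    ∀ (k : Nat) (a : Int) (g : List (List Int)) (n : Int), (R - a).toNat = k →
      0 ≤ a → Shp R C g → n = 1 + a * ((C.toNat : Nat) : Int) →
      (∀ p : Int × Int, InR R C p → pyGet2 g p.1 p.2 = if p.1 < a then p.1 * C + p.2 + 1 else 0) →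
      Shp R C ((PySem.List.pyRange a R 1).foldl
        (fun (st : List (List Int) × Int) row =>
          (PySem.List.pyRange 0 C 1).foldl
            (fun (st : List (List Int) × Int) column => (pySet2 st.1 row column st.2, st.2 + 1)) st)
        (g, n)).1 ∧
      (∀ p : Int × Int, InR R C p →
        pyGet2 ((PySem.List.pyRange a R 1).foldl
          (fun (st : List (List Int) × Int) row =>
            (PySem.List.pyRange 0 C 1).foldl
              (fun (st : List (List Int) × Int) column => (pySet2 st.1 row column st.2, st.2 + 1)) st)
          (g, n)).1 p.1 p.2 = p.1 * C + p.2 + 1) := by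
  intro k
  induction k with
  | zero =>
      intro a g n hk ha hS hn hinv
      rw [show PySem.List.pyRange a R 1 = [] from PySem.List.pyRange_one_eq_nil (by omega)]
      simp only [List.foldl_nil]
      refine ⟨hS, ?_⟩
      intro p hp
      have := hinv p hp
      rw [this, if_pos (by obtain ⟨_, h, _, _⟩ := hp; omega)]
  | succ k ih =>
      intro a g n hk ha hS hn hinv
      have haR : a < R := by omega
      rw [show PySem.List.pyRange a R 1 = a :: PySem.List.pyRange (a+1) R 1 from
        PySem.List.pyRange_one_cons haR, List.foldl_cons]
      rw [inner_spec a ((C - 0).toNat) 0 C rfl g n]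
      set W := (PySem.List.pyRange 0 C 1).map (fun c => ((a, c), n + (c - 0))) with hW
      have hWin : ∀ pv ∈ W, InR R C pv.1 := by
        intro pv hpv
        obtain ⟨c, hc, rfl⟩ := List.mem_map.1 hpv
        rw [PySem.List.mem_pyRange_one] at hc
        exact (by omega : (0:Int) ≤ a ∧ a < R ∧ 0 ≤ c ∧ c < C)
      have hS1 : Shp R C (wApp g W) := shp_wApp R C hS hWin
      have hget1 : ∀ p : Int × Int, InR R C p →
          pyGet2 (wApp g W) p.1 p.2 = if p.1 < a + 1 then p.1 * C + p.2 + 1 else 0 := by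
        intro p hp
        rw [get2_wApp R C hS hWin hp]
        obtain ⟨h1, h2, h3, h4⟩ := hp
        by_cases hpa : p.1 = a
        · rw [hW, lk_map_eq_some (l := PySem.List.pyRange 0 C 1) (i0 := p.2)
            (by rw [PySem.List.mem_pyRange_one]; omega)
            (by rw [← hpa])
            (by intro j hj hdj; exact (Prod.mk.injEq .. ▸ hdj).2)]
          simp only [Option.getD_some]
          have hC : ((C.toNat : Nat) : Int) = C := by omega
          rw [if_pos (by omega), hn, hC, hpa]
          ring
        · rw [lk_map_eq_none (by intro i hi hd; exact hpa ((Prod.mk.injEq .. ▸ hd).1.symm ▸ rfl))]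
          rw [hinv p ⟨h1, h2, h3, h4⟩]
          simp only [Option.getD_none]
          by_cases hlt : p.1 < a
          · rw [if_pos hlt, if_pos (by omega)]
          · rw [if_neg hlt, if_neg (by omega)]
      have := ih (a+1) (wApp g W) (n + ((C - 0).toNat : Int)) (by omega) (by omega) hS1
        (by have hX : ((C - 0).toNat : Int) = ((C.toNat : Nat) : Int) := by omega
            rw [hX, hn]; ring) hget1
      exact this

theorem shp_build (R C : Int) :
    Shp R C ((PySem.List.pyRange 0 R 1).map (fun r => (PySem.List.pyRange 0 C 1).map (fun c => r * C + c + 1))) := by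
  constructor
  · rw [List.length_map, PySem.List.length_pyRange_one]
    omega
  · intro row hrow
    obtain ⟨r, _, rfl⟩ := List.mem_map.1 hrow
    rw [List.length_map, PySem.List.length_pyRange_one]
    omega

theorem shp_zeros (R C : Int) :
    Shp R C ((PySem.List.pyRange 0 R 1).map (fun _ => (PySem.List.pyRange 0 C 1).map (fun _ => (0 : Int)))) := by
  constructor
  · rw [List.length_map, PySem.List.length_pyRange_one]
    omega
  · intro row hrow
    obtain ⟨r, _, rfl⟩ := List.mem_map.1 hrow
    rw [List.length_map, PySem.List.length_pyRange_one]
    omega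

theorem getD_map_pyRange' {β : Type} (f : Int → β) (d : β) (b : Int) (k : Nat) (hk : (k : Int) < b) :
    ((PySem.List.pyRange 0 b 1).map f).getD k d = f k := by
  have h : k < ((PySem.List.pyRange 0 b 1).map f).length := by
    rw [List.length_map, PySem.List.length_pyRange_one]; omega
  rw [List.getD_eq_getElem _ d h, List.getElem_map,
    PySem.List.getElem_pyRange_one 0 b k (by rw [PySem.List.length_pyRange_one]; omega), zero_add]

theorem get_formula (R C : Int) {p : Int × Int} (hp : InR R C p) :
    pyGet2 ((PySem.List.pyRange 0 R 1).map (fun r => (PySem.List.pyRange 0 C 1).map (fun c => r * C + c + 1))) p.1 p.2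
    = p.1 * C + p.2 + 1 := by
  rw [get2_eq R C (shp_build R C) hp]
  obtain ⟨h1, h2, h3, h4⟩ := hp
  rw [getD_map_pyRange' _ [] R p.1.toNat (by omega), getD_map_pyRange' _ 0 C p.2.toNat (by omega),
    Int.toNat_of_nonneg h1, Int.toNat_of_nonneg h3]

theorem get_zeros (R C : Int) {p : Int × Int} (hp : InR R C p) :
    pyGet2 ((PySem.List.pyRange 0 R 1).map (fun _ => (PySem.List.pyRange 0 C 1).map (fun _ => (0 : Int)))) p.1 p.2 = 0 := by
  rw [get2_eq R C (shp_zeros R C) hp]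
  obtain ⟨h1, h2, h3, h4⟩ := hp
  rw [getD_map_pyRange' _ [] R p.1.toNat (by omega), getD_map_pyRange' _ 0 C p.2.toNat (by omega)]

-- the built matrix equals the comprehension matrix
theorem build_eq (R C : Int) :
    ((PySem.List.pyRange 0 R 1).foldl
      (fun (st : List (List Int) × Int) row =>
        (PySem.List.pyRange 0 C 1).foldl
          (fun (st : List (List Int) × Int) column => (pySet2 st.1 row column st.2, st.2 + 1)) st)
      ((PySem.List.pyRange 0 R 1).map (fun _ => (PySem.List.pyRange 0 C 1).map (fun _ => (0 : Int))), 1)).1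
    = (PySem.List.pyRange 0 R 1).map (fun r => (PySem.List.pyRange 0 C 1).map (fun c => r * C + c + 1)) := by
  have h := outer_spec R C (R - 0).toNat 0
    ((PySem.List.pyRange 0 R 1).map (fun _ => (PySem.List.pyRange 0 C 1).map (fun _ => (0 : Int)))) 1
    rfl le_rfl (shp_zeros R C) (by simp)
    (fun p hp => by rw [get_zeros R C hp, if_neg (by exact not_lt.2 hp.1)])
  exact ext2 R C h.1 (shp_build R C) (fun p hp => by rw [h.2 p hp, get_formula R C hp])

-- border segments: membership and nodup facts
theorem mem_hseg {r a b : Int} {p : Int × Int} :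
    p ∈ (PySem.List.pyRange a b 1).map (fun c => (r, c)) ↔ p.1 = r ∧ a ≤ p.2 ∧ p.2 < b := by
  constructor
  · rintro h
    obtain ⟨c, hc, rfl⟩ := List.mem_map.1 h
    rw [PySem.List.mem_pyRange_one] at hc
    exact ⟨rfl, hc.1, hc.2⟩
  · rintro ⟨h1, h2, h3⟩
    exact List.mem_map.2 ⟨p.2, PySem.List.mem_pyRange_one.2 ⟨h2, h3⟩, Prod.ext h1.symm rfl⟩

theorem mem_vseg {c a b : Int} {p : Int × Int} :
    p ∈ (PySem.List.pyRange a b 1).map (fun r => (r, c)) ↔ p.2 = c ∧ a ≤ p.1 ∧ p.1 < b := by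
  constructor
  · rintro h
    obtain ⟨r, hr, rfl⟩ := List.mem_map.1 h
    rw [PySem.List.mem_pyRange_one] at hr
    exact ⟨rfl, hr.1, hr.2⟩
  · rintro ⟨h1, h2, h3⟩
    exact List.mem_map.2 ⟨p.1, PySem.List.mem_pyRange_one.2 ⟨h2, h3⟩, Prod.ext rfl h1.symm⟩

theorem mem_hseg_neg {r a b : Int} {p : Int × Int} :
    p ∈ (PySem.List.pyRange a b (-1)).map (fun c => (r, c)) ↔ p.1 = r ∧ b < p.2 ∧ p.2 ≤ a := by
  constructor
  · rintro h
    obtain ⟨c, hc, rfl⟩ := List.mem_map.1 h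
    rw [PySem.List.mem_pyRange_neg_one] at hc
    exact ⟨rfl, hc.1, hc.2⟩
  · rintro ⟨h1, h2, h3⟩
    exact List.mem_map.2 ⟨p.2, PySem.List.mem_pyRange_neg_one.2 ⟨h2, h3⟩, Prod.ext h1.symm rfl⟩

theorem mem_vseg_neg {c a b : Int} {p : Int × Int} :
    p ∈ (PySem.List.pyRange a b (-1)).map (fun r => (r, c)) ↔ p.2 = c ∧ b < p.1 ∧ p.1 ≤ a := by
  constructor
  · rintro h
    obtain ⟨r, hr, rfl⟩ := List.mem_map.1 h
    rw [PySem.List.mem_pyRange_neg_one] at hr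
    exact ⟨rfl, hr.1, hr.2⟩
  · rintro ⟨h1, h2, h3⟩
    exact List.mem_map.2 ⟨p.1, PySem.List.mem_pyRange_neg_one.2 ⟨h2, h3⟩, Prod.ext rfl h1.symm⟩

theorem nodup_pyRange_neg_one (a b : Int) : (PySem.List.pyRange a b (-1)).Nodup := by
  rw [PySem.List.pyRange_neg_one_eq_reverse]
  exact List.nodup_reverse.2 (PySem.List.nodup_pyRange_one ..)

theorem nodup_hseg (r a b : Int) : ((PySem.List.pyRange a b 1).map (fun c => (r, c))).Nodup :=
  (PySem.List.nodup_pyRange_one ..).map (fun _ _ h => by simpa using (Prod.ext_iff.1 h).2)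

theorem nodup_vseg (c a b : Int) : ((PySem.List.pyRange a b 1).map (fun r => (r, c))).Nodup :=
  (PySem.List.nodup_pyRange_one ..).map (fun _ _ h => by simpa using (Prod.ext_iff.1 h).1)

theorem nodup_hseg_neg (r a b : Int) : ((PySem.List.pyRange a b (-1)).map (fun c => (r, c))).Nodup :=
  (nodup_pyRange_neg_one ..).map (fun _ _ h => by simpa using (Prod.ext_iff.1 h).2)

theorem nodup_vseg_neg (c a b : Int) : ((PySem.List.pyRange a b (-1)).map (fun r => (r, c))).Nodup :=
  (nodup_pyRange_neg_one ..).map (fun _ _ h => by simpa using (Prod.ext_iff.1 h).1)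

theorem pyRange_split2 (a m b : Int) (h1 : a ≤ m - 1) (h2 : m < b) :
    PySem.List.pyRange a b 1 = PySem.List.pyRange a (m-1) 1 ++ (m-1) :: m :: PySem.List.pyRange (m+1) b 1 := by
  rw [PySem.List.pyRange_one_append a (m-1) b (by omega) (by omega),
    PySem.List.pyRange_one_cons (show m-1 < b by omega),
    show m - 1 + 1 = m from by ring,
    PySem.List.pyRange_one_cons h2]

theorem pyRange_split_last (a b : Int) (h : a < b) :
    PySem.List.pyRange a b 1 = PySem.List.pyRange a (b-1) 1 ++ [b-1] := by
  rw [PySem.List.pyRange_one_append a (b-1) b (by omega) (by omega)]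
  congr 1
  have := PySem.List.pyRange_one_singleton (b-1)
  rw [show b - 1 + 1 = b from by ring] at this
  exact this

theorem pyRange_neg_split2 (a m b : Int) (h1 : b ≤ m - 1) (h2 : m < a) :
    PySem.List.pyRange a b (-1)
    = (PySem.List.pyRange (m+2) (a+1) 1).reverse ++ (m+1) :: m :: (PySem.List.pyRange (b+1) m 1).reverse := by
  rw [PySem.List.pyRange_neg_one_eq_reverse,
    pyRange_split2 (b+1) (m+1) (a+1) (by omega) (by omega)]
  simp only [List.reverse_append, List.reverse_cons, List.append_assoc]
  rw [show m + 1 + 1 = m + 2 from by ring, show m + 1 - 1 = m from by ring]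
  simp

theorem inr (R C a b : Int) (h : 0 ≤ a ∧ a < R ∧ 0 ≤ b ∧ b < C) : InR R C (a, b) := h

-- one query: A's step equals B's step
theorem step_core (R C : Int) (g : List (List Int)) (ans : List Int) (r1 c1 r2 c2 : Int)
    (hS : Shp R C g) (hb : 0 ≤ r1 ∧ r1 < r2 ∧ r2 < R ∧ 0 ≤ c1 ∧ c1 < c2 ∧ c2 < C) :
    stepA (g, ans) (r1 + 1, c1 + 1, r2 + 1, c2 + 1) = stepB (g, ans) (r1 + 1, c1 + 1, r2 + 1, c2 + 1)
    ∧ Shp R C (stepB (g, ans) (r1 + 1, c1 + 1, r2 + 1, c2 + 1)).1 := by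
  obtain ⟨hb1, hb2, hb3, hb4, hb5, hb6⟩ := hb
  -- the four index ranges shared by A's loops and B's border segments
  set l1 := PySem.List.pyRange r1 r2 1 with hl1
  set l2 := PySem.List.pyRange c1 c2 1 with hl2
  set l3 := PySem.List.pyRange r2 r1 (-1) with hl3
  set l4 := PySem.List.pyRange c2 c1 (-1) with hl4
  -- A's four write lists (values read from the matrix at loop entry)
  set W1 := l1.map (fun i => ((i, c1), pyGet2 g (i+1) c1)) with hW1
  set W2 := l2.map (fun i => ((r2, i), pyGet2 g r2 (i+1))) with hW2
  set W3 := l3.map (fun i => ((i, c2), pyGet2 g (i-1) c2)) with hW3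
  set W4 := l4.map (fun i => ((r1, i), if i = c1+1 then pyGet2 g (r1+1) c1 else pyGet2 g r1 (i-1))) with hW4
  set WA := ((W1 ++ W2) ++ W3) ++ W4 ++ [((r1, c1+1), pyGet2 g r1 c1)] with hWA
  -- B's border coordinates
  set T := l2.map (fun c => ((r1 : Int), c)) with hT
  set Rt := l1.map (fun r => (r, c2)) with hRt
  set Bt := l4.map (fun c => ((r2 : Int), c)) with hBt
  set Lf := l3.map (fun r => (r, c1)) with hLf
  set coords := T ++ Rt ++ Bt ++ Lf with hcoords
  set old : Int × Int → Int := fun p => pyGet2 g p.1 p.2 with hold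
  have hW1in : ∀ pv ∈ W1, InR R C pv.1 := by
    intro pv hpv
    obtain ⟨i, hi, rfl⟩ := List.mem_map.1 hpv
    rw [hl1, PySem.List.mem_pyRange_one] at hi
    exact inr R C _ _ (by omega)
  have hW2in : ∀ pv ∈ W2, InR R C pv.1 := by
    intro pv hpv
    obtain ⟨i, hi, rfl⟩ := List.mem_map.1 hpv
    rw [hl2, PySem.List.mem_pyRange_one] at hi
    exact inr R C _ _ (by omega)
  have hW3in : ∀ pv ∈ W3, InR R C pv.1 := by
    intro pv hpv
    obtain ⟨i, hi, rfl⟩ := List.mem_map.1 hpv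
    rw [hl3, PySem.List.mem_pyRange_neg_one] at hi
    exact inr R C _ _ (by omega)
  have hW4in : ∀ pv ∈ W4, InR R C pv.1 := by
    intro pv hpv
    obtain ⟨i, hi, rfl⟩ := List.mem_map.1 hpv
    rw [hl4, PySem.List.mem_pyRange_neg_one] at hi
    exact inr R C _ _ (by omega)
  have hWAin : ∀ pv ∈ WA, InR R C pv.1 := by
    intro pv hpv
    rw [hWA] at hpv
    simp only [List.mem_append, List.mem_singleton] at hpv
    rcases hpv with (((h | h) | h) | h) | rfl
    · exact hW1in pv h
    · exact hW2in pv h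
    · exact hW3in pv h
    · exact hW4in pv h
    · exact inr R C _ _ (by omega)
  -- A's first loop
  have e1 : (l1.foldl (fun (p : List (List Int) × Int) i =>
        let data := pyGet2 p.1 (i+1) c1
        (pySet2 p.1 i c1 data, min p.2 data)) (g, pyGet2 g r1 c1))
      = (wApp g W1, List.foldl min (pyGet2 g r1 c1) (l1.map (fun i => pyGet2 g (i+1) c1))) := by
    have h := loop_spec R C (fun i => (i+1, c1)) (fun i => (i, c1)) g hS l1 [] (pyGet2 g r1 c1)
      (by intro pv hpv; cases hpv)
      (by intro i hi
          rw [hl1, PySem.List.mem_pyRange_one] at hi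
          exact ⟨inr R C _ _ (by omega), inr R C _ _ (by omega)⟩)
      (by refine (PySem.List.pairwise_lt_pyRange_one r1 r2).imp ?_
          intro i j hij h
          rw [Prod.mk.injEq] at h
          omega)
    dsimp only at h
    rw [show wApp g [] = g from rfl] at h
    rw [h]
    simp only [lk, Option.getD_none, List.nil_append]
    rw [← List.foldl_map]
  -- A's second loop
  have e2 : ∀ M : Int, ((l2.foldl (fun (p : List (List Int) × Int) i =>
        let data := pyGet2 p.1 r2 (i+1)
        (pySet2 p.1 r2 i data, min p.2 data)) (wApp g W1, M)))
      = (wApp g (W1 ++ W2), List.foldl min M (l2.map (fun i => pyGet2 g r2 (i+1)))) := by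
    intro M
    have h := loop_spec R C (fun i => (r2, i+1)) (fun i => (r2, i)) g hS l2 W1 M hW1in
      (by intro i hi
          rw [hl2, PySem.List.mem_pyRange_one] at hi
          exact ⟨inr R C _ _ (by omega), inr R C _ _ (by omega)⟩)
      (by refine (PySem.List.pairwise_lt_pyRange_one c1 c2).imp ?_
          intro i j hij h
          rw [Prod.mk.injEq] at h
          omega)
    dsimp only at h
    rw [h]
    have hnone : ∀ i ∈ l2, lk W1 (r2, i+1) = none := by
      intro i hi
      rw [hl2, PySem.List.mem_pyRange_one] at hi
      refine lk_map_eq_none ?_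
      intro j hj heq
      rw [hl1, PySem.List.mem_pyRange_one] at hj
      rw [Prod.mk.injEq] at heq
      omega
    rw [List.map_congr_left (fun i hi => by rw [hnone i hi, Option.getD_none]),
      PySem.List.foldl_congr_mem l2 _ (fun m i => min m (pyGet2 g r2 (i+1))) M
        (fun acc i hi => by rw [hnone i hi, Option.getD_none]),
      ← List.foldl_map]
  -- A's third loop
  have hpw3 : l3.Pairwise (· > ·) := by
    rw [hl3, PySem.List.pyRange_neg_one_eq_reverse]
    exact List.pairwise_reverse.2 ((PySem.List.pairwise_lt_pyRange_one ..).imp (fun h => h))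
  have e3 : ∀ M : Int, ((l3.foldl (fun (p : List (List Int) × Int) i =>
        let data := pyGet2 p.1 (i-1) c2
        (pySet2 p.1 i c2 data, min p.2 data)) (wApp g (W1 ++ W2), M)))
      = (wApp g ((W1 ++ W2) ++ W3), List.foldl min M (l3.map (fun i => pyGet2 g (i-1) c2))) := by
    intro M
    have hWin : ∀ pv ∈ W1 ++ W2, InR R C pv.1 := by
      intro pv hpv
      rcases List.mem_append.1 hpv with h | h
      · exact hW1in pv h
      · exact hW2in pv h
    have h := loop_spec R C (fun i => (i-1, c2)) (fun i => (i, c2)) g hS l3 (W1 ++ W2) M hWin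
      (by intro i hi
          rw [hl3, PySem.List.mem_pyRange_neg_one] at hi
          exact ⟨inr R C _ _ (by omega), inr R C _ _ (by omega)⟩)
      (by refine hpw3.imp ?_
          intro i j hij h
          rw [Prod.mk.injEq] at h
          omega)
    dsimp only at h
    rw [h]
    have hnone : ∀ i ∈ l3, lk (W1 ++ W2) (i-1, c2) = none := by
      intro i hi
      rw [hl3, PySem.List.mem_pyRange_neg_one] at hi
      rw [lk_append]
      have h2 : lk W2 (i-1, c2) = none := by
        refine lk_map_eq_none ?_
        intro j hj heq
        rw [hl2, PySem.List.mem_pyRange_one] at hj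
        rw [Prod.mk.injEq] at heq
        omega
      have h1 : lk W1 (i-1, c2) = none := by
        refine lk_map_eq_none ?_
        intro j hj heq
        rw [hl1, PySem.List.mem_pyRange_one] at hj
        rw [Prod.mk.injEq] at heq
        omega
      rw [h1, h2]
      rfl
    rw [List.map_congr_left (fun i hi => by rw [hnone i hi, Option.getD_none]),
      PySem.List.foldl_congr_mem l3 _ (fun m i => min m (pyGet2 g (i-1) c2)) M
        (fun acc i hi => by rw [hnone i hi, Option.getD_none]),
      ← List.foldl_map]
  -- A's fourth loop: the read at i = c1+1 sees the value loop 1 wrote at (r1, c1)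
  have hpw4 : l4.Pairwise (· > ·) := by
    rw [hl4, PySem.List.pyRange_neg_one_eq_reverse]
    exact List.pairwise_reverse.2 ((PySem.List.pairwise_lt_pyRange_one ..).imp (fun h => h))
  have hlk123 : ∀ i ∈ l4, lk ((W1 ++ W2) ++ W3) (r1, i-1)
      = if i = c1+1 then some (pyGet2 g (r1+1) c1) else none := by
    intro i hi
    rw [hl4, PySem.List.mem_pyRange_neg_one] at hi
    rw [lk_append, lk_append]
    have h3 : lk W3 (r1, i-1) = none := by
      refine lk_map_eq_none ?_
      intro j hj heq
      rw [hl3, PySem.List.mem_pyRange_neg_one] at hj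
      rw [Prod.mk.injEq] at heq
      omega
    have h2 : lk W2 (r1, i-1) = none := by
      refine lk_map_eq_none ?_
      intro j hj heq
      rw [hl2, PySem.List.mem_pyRange_one] at hj
      rw [Prod.mk.injEq] at heq
      omega
    rw [h3, h2]
    by_cases hic : i = c1 + 1
    · subst hic
      have h1 : lk W1 (r1, c1 + 1 - 1) = some (pyGet2 g (r1+1) c1) := by
        rw [show c1 + 1 - 1 = c1 from by ring]
        refine lk_map_eq_some (i0 := r1) ?_ rfl ?_
        · rw [hl1, PySem.List.mem_pyRange_one]; omega
        · intro j hj heq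
          rw [Prod.mk.injEq] at heq
          exact heq.1
      rw [h1, if_pos rfl]
      rfl
    · have h1 : lk W1 (r1, i - 1) = none := by
        refine lk_map_eq_none ?_
        intro j hj heq
        rw [hl1, PySem.List.mem_pyRange_one] at hj
        rw [Prod.mk.injEq] at heq
        omega
      rw [h1, if_neg hic]
      rfl
  have e4 : ∀ M : Int, ((l4.foldl (fun (p : List (List Int) × Int) i =>
        let data := pyGet2 p.1 r1 (i-1)
        (pySet2 p.1 (r1 : Int) i data, min p.2 data)) (wApp g ((W1 ++ W2) ++ W3), M)))
      = (wApp g (((W1 ++ W2) ++ W3) ++ W4),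
         List.foldl min M (l4.map (fun i => if i = c1+1 then pyGet2 g (r1+1) c1 else pyGet2 g r1 (i-1)))) := by
    intro M
    have hWin : ∀ pv ∈ (W1 ++ W2) ++ W3, InR R C pv.1 := by
      intro pv hpv
      rcases List.mem_append.1 hpv with h | h
      · rcases List.mem_append.1 h with h' | h'
        · exact hW1in pv h'
        · exact hW2in pv h'
      · exact hW3in pv h
    have h := loop_spec R C (fun i => ((r1 : Int), i-1)) (fun i => ((r1 : Int), i)) g hS l4 ((W1 ++ W2) ++ W3) M hWin
      (by intro i hi
          rw [hl4, PySem.List.mem_pyRange_neg_one] at hi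
          exact ⟨inr R C _ _ (by omega), inr R C _ _ (by omega)⟩)
      (by refine hpw4.imp ?_
          intro i j hij h
          rw [Prod.mk.injEq] at h
          omega)
    dsimp only at h
    rw [h]
    have hmap4 : List.map (fun i => ((r1, i), (lk (W1 ++ W2 ++ W3) (r1, i - 1)).getD (pyGet2 g r1 (i - 1)))) l4 = W4 := by
      rw [hW4]
      refine List.map_congr_left ?_
      intro i hi
      dsimp only
      rw [hlk123 i hi]
      by_cases hic : i = c1+1
      · rw [if_pos hic, if_pos hic, Option.getD_some]
      · rw [if_neg hic, if_neg hic, Option.getD_none]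
    have hfold4 : List.foldl (fun m i => min m ((lk (W1 ++ W2 ++ W3) (r1, i - 1)).getD (pyGet2 g r1 (i - 1)))) M l4
        = List.foldl min M (List.map (fun i => if i = c1 + 1 then pyGet2 g (r1+1) c1 else pyGet2 g r1 (i-1)) l4) := by
      rw [List.foldl_map]
      refine PySem.List.foldl_congr_mem l4 _ _ M ?_
      intro acc i hi
      dsimp only
      rw [hlk123 i hi]
      by_cases hic : i = c1+1
      · rw [if_pos hic, if_pos hic, Option.getD_some]
      · rw [if_neg hic, if_neg hic, Option.getD_none]
    rw [hmap4, hfold4]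
  -- A's step as one write sequence plus one min fold
  have hAchar : stepA (g, ans) (r1 + 1, c1 + 1, r2 + 1, c2 + 1)
      = (wApp g WA, ans ++ [List.foldl min (pyGet2 g r1 c1)
          (l1.map (fun i => pyGet2 g (i+1) c1) ++ l2.map (fun i => pyGet2 g r2 (i+1))
            ++ l3.map (fun i => pyGet2 g (i-1) c2)
            ++ l4.map (fun i => if i = c1+1 then pyGet2 g (r1+1) c1 else pyGet2 g r1 (i-1)))]) := by
    simp only [stepA]
    rw [show r1 + 1 - 1 = r1 from by ring, show c1 + 1 - 1 = c1 from by ring,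
        show r2 + 1 - 1 = r2 from by ring, show c2 + 1 - 1 = c2 from by ring]
    rw [← hl1, ← hl2, ← hl3, ← hl4]
    rw [e1, e2 _, e3 _, e4 _]
    refine Prod.ext ?_ ?_
    · rw [hWA,
        wApp_append g (W1 ++ W2 ++ W3 ++ W4) [((r1, c1 + 1), pyGet2 g r1 c1)],
        wApp_append g (W1 ++ W2 ++ W3) W4]
      rfl
    · show ans ++ [_] = ans ++ [_]
      rw [← List.foldl_append, ← List.foldl_append, ← List.foldl_append]
      dsimp only
      simp only [List.append_assoc]
  -- B's border list: head form and concat form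
  set ctail := ((PySem.List.pyRange (c1+1) c2 1).map (fun c => ((r1 : Int), c))) ++ Rt ++ Bt ++ Lf with hctail
  have hcoords_cons : coords = (r1, c1) :: ctail := by
    rw [hcoords, hctail, hT, hl2,
      show PySem.List.pyRange c1 c2 1 = c1 :: PySem.List.pyRange (c1+1) c2 1 from
        PySem.List.pyRange_one_cons hb5]
    simp [List.cons_append]
  set coordsInit := T ++ Rt ++ Bt ++ ((PySem.List.pyRange (r1+1+1) (r2+1) 1).reverse.map (fun r => (r, c1))) with hcoordsInit
  have hLf_concat : Lf = ((PySem.List.pyRange (r1+1+1) (r2+1) 1).reverse.map (fun r => (r, c1))) ++ [((r1+1 : Int), c1)] := by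
    rw [hLf, hl3, PySem.List.pyRange_neg_one_eq_reverse,
      show PySem.List.pyRange (r1+1) (r2+1) 1 = (r1+1) :: PySem.List.pyRange (r1+1+1) (r2+1) 1 from
        PySem.List.pyRange_one_cons (by omega),
      List.reverse_cons, List.map_append]
    rfl
  have hcoords_concat : coords = coordsInit ++ [((r1+1 : Int), c1)] := by
    rw [hcoords, hcoordsInit, hLf_concat]
    simp [List.append_assoc]
  have hmemcoords : ∀ p ∈ coords, InR R C p := by
    intro p hp
    rw [hcoords] at hp
    simp only [List.mem_append] at hp
    rcases hp with ((hp | hp) | hp) | hp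
    · rw [hT, hl2] at hp
      obtain ⟨e1, e2, e3⟩ := mem_hseg.1 hp
      exact ⟨by omega, by omega, by omega, by omega⟩
    · rw [hRt, hl1] at hp
      obtain ⟨e1, e2, e3⟩ := mem_vseg.1 hp
      exact ⟨by omega, by omega, by omega, by omega⟩
    · rw [hBt, hl4] at hp
      obtain ⟨e1, e2, e3⟩ := mem_hseg_neg.1 hp
      exact ⟨by omega, by omega, by omega, by omega⟩
    · rw [hLf, hl3] at hp
      obtain ⟨e1, e2, e3⟩ := mem_vseg_neg.1 hp
      exact ⟨by omega, by omega, by omega, by omega⟩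
  have hnd : coords.Nodup := by
    rw [hcoords]
    refine List.Nodup.append (List.Nodup.append (List.Nodup.append ?n1 ?n2 ?d1) ?n3 ?d2) ?n4 ?d3
    · exact nodup_hseg r1 c1 c2
    · exact nodup_vseg c2 r1 r2
    · intro p hp1 hp2
      rw [hT, hl2] at hp1
      rw [hRt, hl1] at hp2
      obtain ⟨e1, e2, e3⟩ := mem_hseg.1 hp1
      obtain ⟨f1, f2, f3⟩ := mem_vseg.1 hp2
      omega
    · exact nodup_hseg_neg r2 c2 c1
    · intro p hp1 hp2
      rw [hBt, hl4] at hp2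
      obtain ⟨f1, f2, f3⟩ := mem_hseg_neg.1 hp2
      rcases List.mem_append.1 hp1 with hp | hp
      · rw [hT, hl2] at hp
        obtain ⟨e1, e2, e3⟩ := mem_hseg.1 hp
        omega
      · rw [hRt, hl1] at hp
        obtain ⟨e1, e2, e3⟩ := mem_vseg.1 hp
        omega
    · exact nodup_vseg_neg c1 r2 r1
    · intro p hp1 hp2
      rw [hLf, hl3] at hp2
      obtain ⟨f1, f2, f3⟩ := mem_vseg_neg.1 hp2
      rcases List.mem_append.1 hp1 with hp | hp
      · rcases List.mem_append.1 hp with hp' | hp'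
        · rw [hT, hl2] at hp'
          obtain ⟨e1, e2, e3⟩ := mem_hseg.1 hp'
          omega
        · rw [hRt, hl1] at hp'
          obtain ⟨e1, e2, e3⟩ := mem_vseg.1 hp'
          omega
      · rw [hBt, hl4] at hp
        obtain ⟨e1, e2, e3⟩ := mem_hseg_neg.1 hp
        omega
  -- B's step as the same kind of write sequence
  set WB := ((((r1 : Int), (c1 : Int)), old (r1+1, c1)) :: adjZip old coords) with hWB
  have hvals_concat : coords.map old = (coordsInit.map old) ++ [old (r1+1, c1)] := by
    conv_lhs => rw [hcoords_concat]
    rw [List.map_append]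
    rfl
  have hslice1 : PySem.List.slice (coords.map old) (some (-1)) none = [old (r1+1, c1)] := by
    rw [PySem.List.slice_from_neg_one, hvals_concat]
    simp
  have hdropLast : (coords.map old).dropLast = coords.dropLast.map old := (List.map_dropLast ..).symm
  have hzip : coords.zip ([old (r1+1, c1)] ++ (coords.map old).dropLast) = WB := by
    rw [List.singleton_append, hdropLast, hWB]
    conv_lhs => rw [hcoords_cons]
    conv_rhs => rw [hcoords_cons]
    rw [List.zip_cons_cons]
    congr 1
    exact zip_tail_dropLast old ((r1, c1) :: ctail)
  have hmB : (PySem.List.min? (coords.map old) (fun v => v)).getD 0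
      = List.foldl min (pyGet2 g r1 c1) (ctail.map old) := by
    conv_lhs => rw [hcoords_cons]
    rw [List.map_cons, PySem.List.min?_id_cons, Option.getD_some]
  have hBchar : stepB (g, ans) (r1 + 1, c1 + 1, r2 + 1, c2 + 1)
      = (wApp g WB, ans ++ [List.foldl min (pyGet2 g r1 c1) (ctail.map old)]) := by
    simp only [stepB]
    rw [show r1 + 1 - 1 = r1 from by ring, show c1 + 1 - 1 = c1 from by ring,
        show r2 + 1 - 1 = r2 from by ring, show c2 + 1 - 1 = c2 from by ring]
    rw [← hl1, ← hl2, ← hl3, ← hl4, ← hT, ← hRt, ← hBt, ← hLf, ← hcoords, ← hold]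
    rw [PySem.List.slice_to_neg_one, hslice1, hzip, hmB]
    rfl
  have hWBin : ∀ pv ∈ WB, InR R C pv.1 := by
    intro pv hpv
    rw [hWB] at hpv
    rcases List.mem_cons.1 hpv with rfl | h
    · exact inr R C _ _ (by omega)
    · exact hmemcoords _ (List.mem_of_mem_tail (adjZip_keys old coords pv h))
  -- lookup helpers for A's write list
  have hn1 : ∀ pr pc : Int, ¬(r1 ≤ pr ∧ pr < r2 ∧ pc = c1) → lk W1 (pr, pc) = none := by
    intro pr pc hcond
    refine lk_map_eq_none ?_
    intro j hj heq
    rw [hl1, PySem.List.mem_pyRange_one] at hj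
    rw [Prod.mk.injEq] at heq
    exact hcond ⟨by omega, by omega, by omega⟩
  have hn2 : ∀ pr pc : Int, ¬(pr = r2 ∧ c1 ≤ pc ∧ pc < c2) → lk W2 (pr, pc) = none := by
    intro pr pc hcond
    refine lk_map_eq_none ?_
    intro j hj heq
    rw [hl2, PySem.List.mem_pyRange_one] at hj
    rw [Prod.mk.injEq] at heq
    exact hcond ⟨by omega, by omega, by omega⟩
  have hn3 : ∀ pr pc : Int, ¬(r1 < pr ∧ pr ≤ r2 ∧ pc = c2) → lk W3 (pr, pc) = none := by
    intro pr pc hcond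
    refine lk_map_eq_none ?_
    intro j hj heq
    rw [hl3, PySem.List.mem_pyRange_neg_one] at hj
    rw [Prod.mk.injEq] at heq
    exact hcond ⟨by omega, by omega, by omega⟩
  have hn4 : ∀ pr pc : Int, ¬(pr = r1 ∧ c1 < pc ∧ pc ≤ c2) → lk W4 (pr, pc) = none := by
    intro pr pc hcond
    refine lk_map_eq_none ?_
    intro j hj heq
    rw [hl4, PySem.List.mem_pyRange_neg_one] at hj
    rw [Prod.mk.injEq] at heq
    exact hcond ⟨by omega, by omega, by omega⟩
  have hnf : ∀ pr pc : Int, ¬(pr = r1 ∧ pc = c1+1) →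
      lk [(((r1 : Int), c1+1), pyGet2 g r1 c1)] (pr, pc) = none := by
    intro pr pc hcond
    simp only [lk]
    rw [if_neg (by rw [Prod.mk.injEq]; exact fun h => hcond ⟨h.1.symm, h.2.symm⟩)]
    rfl
  have hsf : lk [(((r1 : Int), c1+1), pyGet2 g r1 c1)] (r1, c1+1) = some (pyGet2 g r1 c1) := by
    simp [lk]
  have hs1 : ∀ pr : Int, r1 ≤ pr → pr < r2 → lk W1 (pr, c1) = some (pyGet2 g (pr+1) c1) := by
    intro pr h1 h2
    refine lk_map_eq_some (i0 := pr) ?_ rfl ?_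
    · rw [hl1, PySem.List.mem_pyRange_one]; omega
    · intro j hj heq
      rw [Prod.mk.injEq] at heq
      exact heq.1
  have hs2 : ∀ pc : Int, c1 ≤ pc → pc < c2 → lk W2 (r2, pc) = some (pyGet2 g r2 (pc+1)) := by
    intro pc h1 h2
    refine lk_map_eq_some (i0 := pc) ?_ rfl ?_
    · rw [hl2, PySem.List.mem_pyRange_one]; omega
    · intro j hj heq
      rw [Prod.mk.injEq] at heq
      exact heq.2
  have hs3 : ∀ pr : Int, r1 < pr → pr ≤ r2 → lk W3 (pr, c2) = some (pyGet2 g (pr-1) c2) := by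
    intro pr h1 h2
    refine lk_map_eq_some (i0 := pr) ?_ rfl ?_
    · rw [hl3, PySem.List.mem_pyRange_neg_one]; omega
    · intro j hj heq
      rw [Prod.mk.injEq] at heq
      exact heq.1
  have hs4 : ∀ pc : Int, c1 < pc → pc ≤ c2 →
      lk W4 (r1, pc) = some (if pc = c1+1 then pyGet2 g (r1+1) c1 else pyGet2 g r1 (pc-1)) := by
    intro pc h1 h2
    refine lk_map_eq_some (i0 := pc) ?_ rfl ?_
    · rw [hl4, PySem.List.mem_pyRange_neg_one]; omega
    · intro j hj heq
      rw [Prod.mk.injEq] at heq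
      exact heq.2
  -- lookup helpers for B's write list
  have hlkWB_split : ∀ (P : List (Int × Int)) (a p : Int × Int) (Q : List (Int × Int)),
      coords = P ++ a :: p :: Q → lk WB p = some (old a) := by
    intro P a p Q hsplit
    rw [hWB]
    simp only [lk]
    have hnd' : (P ++ a :: p :: Q).Nodup := hsplit ▸ hnd
    have := lk_adjZip_split old P a p Q hnd'
    rw [hsplit, this]
    rfl
  have hlkWB_head : lk WB (r1, c1) = some (old (r1+1, c1)) := by
    rw [hWB]
    simp only [lk]
    have hnotin : ((r1 : Int), (c1 : Int)) ∉ coords.tail := by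
      rw [hcoords_cons, List.tail_cons]
      exact (List.nodup_cons.1 (hcoords_cons ▸ hnd)).1
    rw [lk_eq_none (fun pv hpv heq => hnotin (by rw [← heq]; exact adjZip_keys old coords pv hpv))]
    simp
  have hlkWB_none : ∀ p : Int × Int, p ∉ coords → lk WB p = none := by
    intro p hp
    rw [hWB]
    simp only [lk]
    rw [lk_eq_none (fun pv hpv heq =>
        hp (List.mem_of_mem_tail (by rw [← heq]; exact adjZip_keys old coords pv hpv)))]
    rw [if_neg (fun heq => hp (by rw [← heq, hcoords_cons]; exact List.mem_cons_self ..))]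
    rfl
  have hlkAB : ∀ p : Int × Int, InR R C p → lk WA p = lk WB p := by
    intro p _
    obtain ⟨pr, pc⟩ := p
    rw [hWA, lk_append, lk_append, lk_append, lk_append]
    by_cases hpin : ((pr : Int), (pc : Int)) ∈ coords
    · rw [hcoords] at hpin
      simp only [List.mem_append] at hpin
      rcases hpin with ((hseg | hseg) | hseg) | hseg
      · -- top row
        rw [hT, hl2] at hseg
        obtain ⟨e1, e2, e3⟩ := mem_hseg.1 hseg
        have e1' : pr = r1 := e1
        have e2' : c1 ≤ pc := e2
        have e3' : pc < c2 := e3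
        subst pr
        by_cases hc : pc = c1
        · subst pc
          rw [hnf r1 c1 (by omega), hn4 r1 c1 (by omega), hn3 r1 c1 (by omega),
            hn2 r1 c1 (by omega), hs1 r1 (by omega) (by omega), hlkWB_head]
          simp [hold]
        · have hsplitT : coords
              = ((PySem.List.pyRange c1 (pc-1) 1).map (fun c => ((r1 : Int), c)))
                ++ (((r1 : Int), pc-1) :: ((r1 : Int), pc) ::
                  (((PySem.List.pyRange (pc+1) c2 1).map (fun c => ((r1 : Int), c))) ++ (Rt ++ (Bt ++ Lf)))) := by
            rw [hcoords, hT, hl2, pyRange_split2 c1 pc c2 (by omega) (by omega)]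
            simp [List.map_append, List.map_cons, List.append_assoc, List.cons_append]
          rw [hlkWB_split _ _ _ _ hsplitT]
          by_cases hc2 : pc = c1+1
          · subst pc
            rw [hsf]
            simp [hold]
          · rw [hnf r1 pc (by omega), hs4 pc (by omega) (by omega), if_neg hc2]
            simp [hold]
      · -- right column
        rw [hRt, hl1] at hseg
        obtain ⟨e1, e2, e3⟩ := mem_vseg.1 hseg
        have e1' : pc = c2 := e1
        have e2' : r1 ≤ pr := e2
        have e3' : pr < r2 := e3
        subst pc
        by_cases hr : pr = r1
        · subst pr
          have hsplitTR : coords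
              = ((PySem.List.pyRange c1 (c2-1) 1).map (fun c => ((r1 : Int), c)))
                ++ (((r1 : Int), c2-1) :: ((r1 : Int), c2) ::
                  (((PySem.List.pyRange (r1+1) r2 1).map (fun r => (r, c2))) ++ (Bt ++ Lf))) := by
            rw [hcoords, hT, hl2, pyRange_split_last c1 c2 hb5, hRt, hl1,
              PySem.List.pyRange_one_cons hb2]
            simp [List.map_append, List.map_cons, List.append_assoc, List.cons_append]
          rw [hlkWB_split _ _ _ _ hsplitTR]
          by_cases hc2 : c2 = c1+1
          · rw [show ((r1 : Int), c2) = (r1, c1+1) from by rw [hc2], hsf, hold]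
            simp only
            rw [show c2 - 1 = c1 from by omega]
            simp
          · rw [hnf r1 c2 (by omega), hs4 c2 (by omega) (by omega), if_neg hc2]
            simp [hold]
        · have hsplitRt : coords
              = (T ++ ((PySem.List.pyRange r1 (pr-1) 1).map (fun r => (r, c2))))
                ++ ((pr-1, c2) :: (pr, c2) ::
                  (((PySem.List.pyRange (pr+1) r2 1).map (fun r => (r, c2))) ++ (Bt ++ Lf))) := by
            rw [hcoords, hRt, hl1, pyRange_split2 r1 pr r2 (by omega) (by omega)]
            simp [List.map_append, List.map_cons, List.append_assoc, List.cons_append]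
          rw [hlkWB_split _ _ _ _ hsplitRt]
          rw [hnf pr c2 (by omega), hn4 pr c2 (by omega), hs3 pr (by omega) (by omega)]
          simp [hold]
      · -- bottom row
        rw [hBt, hl4] at hseg
        obtain ⟨e1, e2, e3⟩ := mem_hseg_neg.1 hseg
        have e1' : pr = r2 := e1
        have e2' : c1 < pc := e2
        have e3' : pc ≤ c2 := e3
        subst pr
        by_cases hc : pc = c2
        · subst pc
          have hsplitRB : coords
              = ((T ++ ((PySem.List.pyRange r1 (r2-1) 1).map (fun r => (r, c2)))))
                ++ ((r2-1, c2) :: (r2, c2) ::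
                  (((PySem.List.pyRange (c2-1) c1 (-1)).map (fun c => ((r2 : Int), c))) ++ Lf)) := by
            rw [hcoords, hRt, hl1, pyRange_split_last r1 r2 hb2, hBt, hl4,
              PySem.List.pyRange_neg_one_cons hb5]
            simp [List.map_append, List.map_cons, List.append_assoc, List.cons_append]
          rw [hlkWB_split _ _ _ _ hsplitRB]
          rw [hnf r2 c2 (by omega), hn4 r2 c2 (by omega), hs3 r2 (by omega) (by omega)]
          simp [hold]
        · have hsplitBt : coords
              = ((T ++ Rt) ++ (((PySem.List.pyRange (pc+2) (c2+1) 1).reverse.map (fun c => ((r2 : Int), c)))))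
                ++ ((r2, pc+1) :: (r2, pc) ::
                  (((PySem.List.pyRange (c1+1) pc 1).reverse.map (fun c => ((r2 : Int), c))) ++ Lf)) := by
            rw [hcoords, hBt, hl4, pyRange_neg_split2 c2 pc c1 (by omega) (by omega)]
            simp [List.map_append, List.map_cons, List.append_assoc, List.cons_append]
          rw [hlkWB_split _ _ _ _ hsplitBt]
          rw [hnf r2 pc (by omega), hn4 r2 pc (by omega), hn3 r2 pc (by omega),
            hs2 pc (by omega) (by omega)]
          simp [hold]
      · -- left column
        rw [hLf, hl3] at hseg
        obtain ⟨e1, e2, e3⟩ := mem_vseg_neg.1 hseg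
        have e1' : pc = c1 := e1
        have e2' : r1 < pr := e2
        have e3' : pr ≤ r2 := e3
        subst pc
        by_cases hr : pr = r2
        · subst pr
          have hsplitBL : coords
              = (((T ++ Rt) ++ ((PySem.List.pyRange (c1+1+1) (c2+1) 1).reverse.map (fun c => ((r2 : Int), c)))))
                ++ ((r2, c1+1) :: (r2, c1) ::
                  ((PySem.List.pyRange (r2-1) r1 (-1)).map (fun r => (r, c1)))) := by
            rw [hcoords, hBt, hl4, PySem.List.pyRange_neg_one_eq_reverse,
              show PySem.List.pyRange (c1+1) (c2+1) 1
                  = (c1+1) :: PySem.List.pyRange (c1+1+1) (c2+1) 1 from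
                PySem.List.pyRange_one_cons (by omega),
              List.reverse_cons, hLf, hl3, PySem.List.pyRange_neg_one_cons hb2]
            simp [List.map_append, List.map_cons, List.append_assoc, List.cons_append]
          rw [hlkWB_split _ _ _ _ hsplitBL]
          rw [hnf r2 c1 (by omega), hn4 r2 c1 (by omega), hn3 r2 c1 (by omega),
            hs2 c1 (by omega) (by omega)]
          simp [hold]
        · have hsplitLf : coords
              = (((T ++ Rt) ++ Bt) ++ ((PySem.List.pyRange (pr+2) (r2+1) 1).reverse.map (fun r => (r, c1))))
                ++ ((pr+1, c1) :: (pr, c1) ::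
                  ((PySem.List.pyRange (r1+1) pr 1).reverse.map (fun r => (r, c1)))) := by
            rw [hcoords, hLf, hl3, pyRange_neg_split2 r2 pr r1 (by omega) (by omega)]
            simp [List.map_append, List.map_cons, List.append_assoc]
          rw [hlkWB_split _ _ _ _ hsplitLf]
          rw [hnf pr c1 (by omega), hn4 pr c1 (by omega), hn3 pr c1 (by omega),
            hn2 pr c1 (by omega), hs1 pr (by omega) (by omega)]
          simp [hold]
    · -- not a border cell: neither program writes it
      rw [hlkWB_none _ hpin]
      have hnotT : ¬(pr = r1 ∧ c1 ≤ pc ∧ pc < c2) := by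
        intro hc
        refine hpin ?_
        rw [hcoords]
        simp only [List.mem_append]
        left; left; left
        rw [hT, hl2]
        exact mem_hseg.2 ⟨hc.1, hc.2.1, hc.2.2⟩
      have hnotRt : ¬(pc = c2 ∧ r1 ≤ pr ∧ pr < r2) := by
        intro hc
        refine hpin ?_
        rw [hcoords]
        simp only [List.mem_append]
        left; left; right
        rw [hRt, hl1]
        exact mem_vseg.2 ⟨hc.1, hc.2.1, hc.2.2⟩
      have hnotBt : ¬(pr = r2 ∧ c1 < pc ∧ pc ≤ c2) := by
        intro hc
        refine hpin ?_
        rw [hcoords]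
        simp only [List.mem_append]
        left; right
        rw [hBt, hl4]
        exact mem_hseg_neg.2 ⟨hc.1, hc.2.1, hc.2.2⟩
      have hnotLf : ¬(pc = c1 ∧ r1 < pr ∧ pr ≤ r2) := by
        intro hc
        refine hpin ?_
        rw [hcoords]
        simp only [List.mem_append]
        right
        rw [hLf, hl3]
        exact mem_vseg_neg.2 ⟨hc.1, hc.2.1, hc.2.2⟩
      rw [hnf pr pc (by omega), hn4 pr pc (by omega), hn3 pr pc (by omega),
        hn2 pr pc (by omega), hn1 pr pc (by omega)]
      rfl
  have hmins : List.foldl min (pyGet2 g r1 c1)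
        (l1.map (fun i => pyGet2 g (i+1) c1) ++ l2.map (fun i => pyGet2 g r2 (i+1))
          ++ l3.map (fun i => pyGet2 g (i-1) c2)
          ++ l4.map (fun i => if i = c1+1 then pyGet2 g (r1+1) c1 else pyGet2 g r1 (i-1)))
      = List.foldl min (pyGet2 g r1 c1) (ctail.map old) := by
    set tmp := pyGet2 g r1 c1 with htmp
    set LA := l1.map (fun i => pyGet2 g (i+1) c1) ++ l2.map (fun i => pyGet2 g r2 (i+1))
      ++ l3.map (fun i => pyGet2 g (i-1) c2)
      ++ l4.map (fun i => if i = c1+1 then pyGet2 g (r1+1) c1 else pyGet2 g r1 (i-1)) with hLA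
    set LB := ctail.map old with hLB
    have hvalsAB : coords.map old = tmp :: LB := by
      rw [hLB]
      conv_lhs => rw [hcoords_cons]
      rfl
    have hAv : ∀ w ∈ LA, w ∈ coords.map old := by
      intro w hw
      rw [hLA] at hw
      simp only [List.mem_append] at hw
      rcases hw with ((hw | hw) | hw) | hw
      · obtain ⟨i, hi, rfl⟩ := List.mem_map.1 hw
        rw [hl1, PySem.List.mem_pyRange_one] at hi
        refine List.mem_map.2 ⟨(i+1, c1), ?_, rfl⟩
        rw [hcoords]
        simp only [List.mem_append]
        right
        rw [hLf, hl3]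
        exact mem_vseg_neg.2 ⟨rfl, by omega, by omega⟩
      · obtain ⟨i, hi, rfl⟩ := List.mem_map.1 hw
        rw [hl2, PySem.List.mem_pyRange_one] at hi
        refine List.mem_map.2 ⟨(r2, i+1), ?_, rfl⟩
        rw [hcoords]
        simp only [List.mem_append]
        left; right
        rw [hBt, hl4]
        exact mem_hseg_neg.2 ⟨rfl, by omega, by omega⟩
      · obtain ⟨i, hi, rfl⟩ := List.mem_map.1 hw
        rw [hl3, PySem.List.mem_pyRange_neg_one] at hi
        refine List.mem_map.2 ⟨(i-1, c2), ?_, rfl⟩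
        rw [hcoords]
        simp only [List.mem_append]
        left; left; right
        rw [hRt, hl1]
        exact mem_vseg.2 ⟨rfl, by omega, by omega⟩
      · obtain ⟨i, hi, rfl⟩ := List.mem_map.1 hw
        rw [hl4, PySem.List.mem_pyRange_neg_one] at hi
        by_cases hic : i = c1+1
        · rw [if_pos hic]
          refine List.mem_map.2 ⟨(r1+1, c1), ?_, rfl⟩
          rw [hcoords]
          simp only [List.mem_append]
          right
          rw [hLf, hl3]
          exact mem_vseg_neg.2 ⟨rfl, by omega, by omega⟩
        · rw [if_neg hic]
          refine List.mem_map.2 ⟨(r1, i-1), ?_, rfl⟩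
          rw [hcoords]
          simp only [List.mem_append]
          left; left; left
          rw [hT, hl2]
          exact mem_hseg.2 ⟨rfl, by omega, by omega⟩
    have hBv : ∀ w ∈ coords.map old, w = tmp ∨ w ∈ LA := by
      intro w hw
      obtain ⟨p, hp, rfl⟩ := List.mem_map.1 hw
      obtain ⟨pr, pc⟩ := p
      rw [hcoords] at hp
      simp only [List.mem_append] at hp
      rcases hp with ((hp | hp) | hp) | hp
      · rw [hT, hl2] at hp
        obtain ⟨e1, e2, e3⟩ := mem_hseg.1 hp
        have e1' : pr = r1 := e1
        have e2' : c1 ≤ pc := e2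
        have e3' : pc < c2 := e3
        subst pr
        by_cases hc : pc = c1
        · subst pc
          left
          rfl
        · right
          rw [hLA]
          simp only [List.mem_append]
          right
          refine List.mem_map.2 ⟨pc+1, ?_, ?_⟩
          · rw [hl4, PySem.List.mem_pyRange_neg_one]; omega
          · rw [if_neg (by omega), hold]
            simp only
            rw [show pc + 1 - 1 = pc from by ring]
      · rw [hRt, hl1] at hp
        obtain ⟨e1, e2, e3⟩ := mem_vseg.1 hp
        have e1' : pc = c2 := e1
        have e2' : r1 ≤ pr := e2
        have e3' : pr < r2 := e3
        subst pc
        right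
        rw [hLA]
        simp only [List.mem_append]
        left; right
        refine List.mem_map.2 ⟨pr+1, ?_, ?_⟩
        · rw [hl3, PySem.List.mem_pyRange_neg_one]; omega
        · rw [hold]
          simp only
          rw [show pr + 1 - 1 = pr from by ring]
      · rw [hBt, hl4] at hp
        obtain ⟨e1, e2, e3⟩ := mem_hseg_neg.1 hp
        have e1' : pr = r2 := e1
        have e2' : c1 < pc := e2
        have e3' : pc ≤ c2 := e3
        subst pr
        right
        rw [hLA]
        simp only [List.mem_append]
        left; left; right
        refine List.mem_map.2 ⟨pc-1, ?_, ?_⟩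
        · rw [hl2, PySem.List.mem_pyRange_one]; omega
        · rw [hold]
          simp only
          rw [show pc - 1 + 1 = pc from by ring]
      · rw [hLf, hl3] at hp
        obtain ⟨e1, e2, e3⟩ := mem_vseg_neg.1 hp
        have e1' : pc = c1 := e1
        have e2' : r1 < pr := e2
        have e3' : pr ≤ r2 := e3
        subst pc
        right
        rw [hLA]
        simp only [List.mem_append]
        left; left; left
        refine List.mem_map.2 ⟨pr-1, ?_, ?_⟩
        · rw [hl1, PySem.List.mem_pyRange_one]; omega
        · rw [hold]
          simp only
          rw [show pr - 1 + 1 = pr from by ring]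
    have hxle := PySem.List.foldl_min_le LA tmp
    have hyle := PySem.List.foldl_min_le LB tmp
    have hxmem := PySem.List.foldl_min_mem LA tmp
    have hymem := PySem.List.foldl_min_mem LB tmp
    refine le_antisymm ?_ ?_
    · rcases hymem with hy | hy
      · rw [hy]; exact hxle.1
      · rcases hBv _ (by rw [hvalsAB]; exact List.mem_cons_of_mem _ hy) with hy' | hy'
        · rw [hy']; exact hxle.1
        · exact hxle.2 _ hy'
    · rcases hxmem with hx | hx
      · rw [hx]; exact hyle.1
      · have := hAv _ hx
        rw [hvalsAB] at this
        rcases List.mem_cons.1 this with hx' | hx'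
        · rw [hx']; exact hyle.1
        · exact hyle.2 _ hx'

  constructor
  · rw [hAchar, hBchar]
    refine Prod.ext ?_ ?_
    · exact ext2 R C (shp_wApp R C hS hWAin) (shp_wApp R C hS hWBin)
        (fun p hp => by rw [get2_wApp R C hS hWAin hp, get2_wApp R C hS hWBin hp, hlkAB p hp])
    · dsimp only
      rw [hmins]
  · rw [hBchar]
    exact shp_wApp R C hS hWBin

theorem step_eq (R C : Int) (g : List (List Int)) (ans : List Int) (q : Int × Int × Int × Int)
    (hS : Shp R C g)
    (hq : 1 ≤ q.1 ∧ q.1 < q.2.2.1 ∧ q.2.2.1 ≤ R ∧ 1 ≤ q.2.1 ∧ q.2.1 < q.2.2.2 ∧ q.2.2.2 ≤ C) :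
    stepA (g, ans) q = stepB (g, ans) q ∧ Shp R C (stepB (g, ans) q).1 := by
  obtain ⟨x1, y1, x2, y2⟩ := q
  obtain ⟨h1, h2, h3, h4, h5, h6⟩ := hq
  dsimp only at h1 h2 h3 h4 h5 h6
  have hqe : ((x1 : Int), (y1 : Int), (x2 : Int), (y2 : Int))
      = ((x1 - 1) + 1, (y1 - 1) + 1, (x2 - 1) + 1, (y2 - 1) + 1) := by
    simp only [Prod.mk.injEq]
    omega
  rw [hqe]
  exact step_core R C g ans (x1 - 1) (y1 - 1) (x2 - 1) (y2 - 1) hS (by omega)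

theorem fold_eq (R C : Int) :
    ∀ (qs : List (Int × Int × Int × Int)) (g : List (List Int)) (ans : List Int),
      Shp R C g →
      (∀ q ∈ qs, 1 ≤ q.1 ∧ q.1 < q.2.2.1 ∧ q.2.2.1 ≤ R ∧ 1 ≤ q.2.1 ∧ q.2.1 < q.2.2.2 ∧ q.2.2.2 ≤ C) →
      qs.foldl stepA (g, ans) = qs.foldl stepB (g, ans) := by
  intro qs
  induction qs with
  | nil => intro g ans _ _; rfl
  | cons q qs ih =>
      intro g ans hS hqs
      have h := step_eq R C g ans q hS (hqs q (List.mem_cons_self ..))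
      rw [List.foldl_cons, List.foldl_cons, h.1]
      rcases hq' : stepB (g, ans) q with ⟨g', ans'⟩
      rw [hq'] at h
      exact ih g' ans' h.2 (fun x hx => hqs x (List.mem_cons_of_mem _ hx))

-- ===== VERDICT (by name: the statement is the Claim_ definition above) =====
theorem solution_spec : Claim_equal_solution := by
  intro R C qs _ hpre
  unfold Spec_solution solution solution_alt
  rw [build_eq R C, fold_eq R C qs _ [] (shp_build R C) hpre]
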